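-- pv_equiv track=rewrite | github.com/koumudiraju/CS5350-6350-in-University-of-Utah | Decison Tree/Unknown_Bank_Decision_Tree.py | replace_unknown_with_majority
-- ===== SOURCE A (Python) =====
-- from collections import Counter
--
-- def replace_unknown_with_majority(data):
--     for col in range(len(data[0])):
--         values = [row[col] for row in data if row[col] != 'unknown']
--         majority_value = Counter(values).most_common(1)[0][0]
--
--         for row in data:
--             if row[col] == 'unknown':
--                 row[col] = majority_value
--     return data
-- ===== SOURCE B (Python) =====
-- from collections import Counter
--
-- def replace_unknown_with_majority(data):
--     # One row-major pass builds all column counters at once; then majorities are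
--     # computed up front and every 'unknown' is replaced row by row.
--     ncols = len(data[0])
--     counters = [Counter() for _ in range(ncols)]
--     for row in data:
--         for counter, value in zip(counters, row):
--             if value != 'unknown':
--                 counter[value] += 1
--     majorities = [c.most_common(1)[0][0] for c in counters]
--     for row in data:
--         for col in range(ncols):
--             if row[col] == 'unknown':
--                 row[col] = majorities[col]
--     return data
-- ===== Notes on version B (the rewrite author's own statement) =====
-- stated objective: alternative
-- what changed: A makes a separate column-major pass (list comprehension + Counter) per column, interleaved with that column's replacement; B builds all column counters in one row-major pass over the data, computes the majority list up front, then does the replacement row by row.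
import Mathlib
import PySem

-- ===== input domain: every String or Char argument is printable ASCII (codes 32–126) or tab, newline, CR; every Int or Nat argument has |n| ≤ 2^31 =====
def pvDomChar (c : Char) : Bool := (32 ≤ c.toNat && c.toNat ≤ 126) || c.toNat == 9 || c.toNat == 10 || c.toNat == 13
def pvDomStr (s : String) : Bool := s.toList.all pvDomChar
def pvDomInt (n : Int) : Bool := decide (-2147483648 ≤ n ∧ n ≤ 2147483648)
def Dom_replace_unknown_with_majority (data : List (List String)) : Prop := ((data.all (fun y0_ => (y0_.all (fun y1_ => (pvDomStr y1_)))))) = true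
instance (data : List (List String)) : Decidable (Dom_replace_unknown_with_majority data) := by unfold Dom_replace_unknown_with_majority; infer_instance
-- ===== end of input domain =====

-- B builds all column counters in one row-major pass and replaces afterwards, instead of
-- A's per-column scan interleaved with replacement; equivalence is about the RETURN value
-- (both Pythons also mutate `data` in place, to the same final state).


-- ===== PORT A =====
-- Counter[v] += 1 on an insertion-ordered association list (Counter keeps first-insertion order)
def pvIncr : List (String × Int) → String → List (String × Int)
  | [], v => [(v, 1)]
  | (k, c) :: rest, v => if k = v then (k, c + 1) :: rest else (k, c) :: pvIncr rest v

-- Counter(values)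
def pvCounter (values : List String) : List (String × Int) :=
  values.foldl pvIncr []

-- Counter.most_common(1)[0][0]: first key (insertion order) with maximal count; none = IndexError
def pvMostCommon1 (cnt : List (String × Int)) : Option String :=
  (cnt.foldl (fun acc p =>
    match acc with
    | none => some p
    | some q => if q.2 < p.2 then some p else some q) none).map Prod.fst

-- the body of A's outer `for col in range(len(data[0]))` loop
def pvStepA (d : List (List String)) (col : Nat) : List (List String) :=
  let values := (d.filter (fun row => row.getD col "" ≠ "unknown")).map (fun row => row.getD col "")
  let majority := (pvMostCommon1 (pvCounter values)).getD ""
  d.map (fun row => if row.getD col "" = "unknown" then row.set col majority else row)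

def replace_unknown_with_majority (data : List (List String)) : List (List String) :=
  (List.range (data.headD []).length).foldl pvStepA data

-- ===== PORT B =====
-- the body of B's `for counter, value in zip(counters, row)` loop
def pvZ (cnt : List (String × Int)) (v : String) : List (String × Int) :=
  if v ≠ "unknown" then pvIncr cnt v else cnt

def replace_unknown_with_majority_alt (data : List (List String)) : List (List String) :=
  let ncols := (data.headD []).length
  let counters := data.foldl (fun cs row => List.zipWith pvZ cs row) (List.replicate ncols [])
  let majorities := counters.map (fun c => (pvMostCommon1 c).getD "")
  data.map (fun row =>
    (List.range ncols).foldl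
      (fun r col => if r.getD col "" = "unknown" then r.set col (majorities.getD col "") else r) row)

-- ===== PRECONDITION & SPEC =====
-- Exactly where the Python A returns: data nonempty (else len(data[0]) raises IndexError),
-- every row at least as long as row 0 (else row[col] raises IndexError), and every column
-- holding at least one non-'unknown' value (else most_common(1)[0] raises IndexError).
def Pre_replace_unknown_with_majority (data : List (List String)) : Prop :=
  data ≠ [] ∧
  (∀ row ∈ data, (data.headD []).length ≤ row.length) ∧
  (∀ col ∈ List.range (data.headD []).length, ∃ row ∈ data, row.getD col "" ≠ "unknown")
instance (data : List (List String)) : Decidable (Pre_replace_unknown_with_majority data) := by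
  unfold Pre_replace_unknown_with_majority; infer_instance
def pvWitness_replace_unknown_with_majority : List (List String) :=
  [["unknown", "a"], ["b", "a"], ["b", "unknown"]]

def Spec_replace_unknown_with_majority (data : List (List String)) (out : List (List String)) : Prop := out = replace_unknown_with_majority_alt data
instance (data : List (List String)) (out : List (List String)) : Decidable (Spec_replace_unknown_with_majority data out) := by unfold Spec_replace_unknown_with_majority; infer_instance

-- ===== CLAIM (what is proved, stated in full; the proofs are below) =====
def Claim_equal_replace_unknown_with_majority : Prop := ∀ (data : List (List String)), Dom_replace_unknown_with_majority data → Pre_replace_unknown_with_majority data → Spec_replace_unknown_with_majority data (replace_unknown_with_majority data)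

-- ===== LEMMAS AND PROOFS =====

-- the non-'unknown' values of column `col` in row order
def pvColVals (data : List (List String)) (col : Nat) : List String :=
  (data.filter (fun row => row.getD col "" ≠ "unknown")).map (fun row => row.getD col "")

-- the majority value of column `col`
def pvMaj (data : List (List String)) (col : Nat) : String :=
  (pvMostCommon1 (pvCounter (pvColVals data col))).getD ""

-- replacing in one row at one column
def pvG (v : String) (col : Nat) (row : List String) : List String :=
  if row.getD col "" = "unknown" then row.set col v else row

lemma pvG_getD_ne (v : String) (c c' : Nat) (h : c ≠ c') (row : List String) :
    (pvG v c row).getD c' "" = row.getD c' "" := by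
  unfold pvG
  split_ifs with h1
  · simp [List.getD_eq_getElem?_getD, List.getElem?_set_ne h]
  · rfl

lemma pvColVals_cons (row : List String) (d : List (List String)) (c : Nat) :
    pvColVals (row :: d) c =
      if row.getD c "" ≠ "unknown" then row.getD c "" :: pvColVals d c else pvColVals d c := by
  simp only [pvColVals, List.filter_cons]
  split_ifs with h1 h2 <;> simp_all

lemma pvColVals_map_pvG (v : String) (c c' : Nat) (h : c ≠ c') (d : List (List String)) :
    pvColVals (d.map (pvG v c)) c' = pvColVals d c' := by
  induction d with
  | nil => rfl
  | cons row rest ih =>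
    rw [List.map_cons, pvColVals_cons, pvColVals_cons, pvG_getD_ne v c c' h row, ih]

lemma pvStepA_eq (d : List (List String)) (c : Nat) :
    pvStepA d c = d.map (pvG (pvMaj d c) c) := rfl

lemma A_fold_eq (cs : List Nat) (data0 : List (List String)) :
    ∀ d : List (List String), cs.Nodup → (∀ c ∈ cs, pvColVals d c = pvColVals data0 c) →
    cs.foldl pvStepA d = d.map (fun row => cs.foldl (fun r c => pvG (pvMaj data0 c) c r) row) := by
  induction cs with
  | nil => intro d _ _; simp
  | cons c cs ih =>
    intro d hnd hcols
    obtain ⟨hc, hnd'⟩ := List.nodup_cons.mp hnd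
    have hm : pvMaj d c = pvMaj data0 c := by
      unfold pvMaj; rw [hcols c (by simp)]
    simp only [List.foldl_cons, pvStepA_eq, hm]
    rw [ih (d.map (pvG (pvMaj data0 c) c)) hnd'
        (fun c' hc' => by
          rw [pvColVals_map_pvG _ c c' (fun he => hc (he ▸ hc')) d]
          exact hcols c' (List.mem_cons_of_mem _ hc')),
      List.map_map]
    rfl

lemma B_len (data : List (List String)) :
    ∀ cs : List (List (String × Int)), (∀ row ∈ data, cs.length ≤ row.length) →
    (data.foldl (fun cs row => List.zipWith pvZ cs row) cs).length = cs.length := by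
  induction data with
  | nil => intro cs _; rfl
  | cons row rest ih =>
    intro cs h
    have h0 := h row (by simp)
    rw [List.foldl_cons, ih _ (by
      intro r hr
      have := h r (List.mem_cons_of_mem _ hr)
      rw [List.length_zipWith]; omega)]
    rw [List.length_zipWith]; omega

lemma B_counters (data : List (List String)) (c : Nat) :
    ∀ cs : List (List (String × Int)), (∀ row ∈ data, cs.length ≤ row.length) → c < cs.length →
    (data.foldl (fun cs row => List.zipWith pvZ cs row) cs).getD c [] =
      (pvColVals data c).foldl pvIncr (cs.getD c []) := by
  induction data with
  | nil => intro cs _ _; rfl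
  | cons row rest ih =>
    intro cs hlen hc
    have h0 := hlen row (by simp)
    have hzlen : (List.zipWith pvZ cs row).length = cs.length := by
      rw [List.length_zipWith]; omega
    rw [List.foldl_cons, ih _ (by
        intro r hr
        have := hlen r (List.mem_cons_of_mem _ hr)
        omega) (by omega)]
    have hrow : c < row.length := by omega
    have hz : (List.zipWith pvZ cs row).getD c [] = pvZ (cs.getD c []) (row.getD c "") := by
      rw [List.getD_eq_getElem _ _ (by omega), List.getElem_zipWith,
          List.getD_eq_getElem _ _ hc, List.getD_eq_getElem _ _ hrow]
    rw [hz, pvColVals_cons]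
    simp only [pvZ, List.getD_eq_getElem?_getD, ne_eq, ite_not]
    by_cases hv : row[c]?.getD "" = "unknown" <;> simp [hv]

lemma pvMajorities_getD (data : List (List String)) (c : Nat)
    (hlen : ∀ row ∈ data, (data.headD []).length ≤ row.length)
    (hc : c < (data.headD []).length) :
    ((data.foldl (fun cs row => List.zipWith pvZ cs row)
        (List.replicate (data.headD []).length [])).map
      (fun cn => (pvMostCommon1 cn).getD "")).getD c "" = pvMaj data c := by
  have hlen' : ∀ row ∈ data,
      (List.replicate (data.headD []).length ([] : List (String × Int))).length ≤ row.length := by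
    intro r hr; rw [List.length_replicate]; exact hlen r hr
  have hcc : c < (data.foldl (fun cs row => List.zipWith pvZ cs row)
      (List.replicate (data.headD []).length ([] : List (String × Int)))).length := by
    rw [B_len data _ hlen', List.length_replicate]; exact hc
  rw [List.getD_eq_getElem _ "" (by rw [List.length_map]; exact hcc), List.getElem_map,
      ← List.getD_eq_getElem _ ([] : List (String × Int)) hcc,
      B_counters data c _ hlen' (by rw [List.length_replicate]; exact hc),
      List.getD_eq_getElem _ _ (by rw [List.length_replicate]; exact hc)]
  simp [pvMaj, pvCounter]

-- ===== VERDICT (by name: the statement is the Claim_ definition above) =====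
theorem replace_unknown_with_majority_spec : Claim_equal_replace_unknown_with_majority := by
  intro data _ hpre
  obtain ⟨hne, hlen, _⟩ := hpre
  unfold Spec_replace_unknown_with_majority replace_unknown_with_majority
    replace_unknown_with_majority_alt
  rw [A_fold_eq (List.range (data.headD []).length) data data (List.nodup_range)
      (fun _ _ => rfl)]
  apply List.map_congr_left
  intro row _
  apply PySem.List.foldl_congr_mem
  intro r c hc
  rw [pvMajorities_getD data c hlen (List.mem_range.mp hc)]
  rfl
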